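-- pv_equiv track=rewrite | github.com/MaddieM4/Laura | Redis/sanitizer.py | sanitize
-- ===== SOURCE A (Python) =====
-- def sanitize(string):
-- 	split = string.splitlines()
-- 	rsplit = []
-- 	for i in split:
-- 		if i != "":
-- 			rsplit.append(i)
-- 	string = " --paragraph* ".join(rsplit)
-- 	return " ".join(['--start*']+string.split()+['--end*'])
-- ===== SOURCE B (Python) =====
-- def sanitize(string):
--     lines = [l for l in string.splitlines() if l != ""]
--     tokens = ['--start*']
--     for idx, line in enumerate(lines):
--         if idx > 0:
--             tokens.append('--paragraph*')
--         tokens.extend(line.split())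
--     tokens.append('--end*')
--     return ' '.join(tokens)
-- ===== Notes on version B (the rewrite author's own statement) =====
-- stated objective: simpler
-- what changed: B builds the output token list in a single pass over the kept lines (inserting '--paragraph*' before each line after the first and extending with the line's words) instead of A's join-with-separator followed by a full re-split of the joined string.
import Mathlib
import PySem

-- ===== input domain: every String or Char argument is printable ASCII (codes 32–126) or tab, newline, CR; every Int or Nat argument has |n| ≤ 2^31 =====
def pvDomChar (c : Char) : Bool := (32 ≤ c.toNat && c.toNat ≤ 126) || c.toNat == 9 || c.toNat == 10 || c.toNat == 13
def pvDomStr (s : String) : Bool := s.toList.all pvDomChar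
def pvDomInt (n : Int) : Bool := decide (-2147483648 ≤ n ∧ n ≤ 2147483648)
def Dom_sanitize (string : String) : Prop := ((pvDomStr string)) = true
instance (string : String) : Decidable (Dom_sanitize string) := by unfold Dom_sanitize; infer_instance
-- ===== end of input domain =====

-- B builds the token list in one pass over the kept lines (separator before each line
-- after the first, per-line split) instead of A's join-then-resplit; objective: simpler.

-- ===== PORT A =====
def sanitize (string : String) : String :=
  let split := PySem.Str.splitlines string
  let rsplit := split.foldl (fun acc i => if i ≠ "" then acc ++ [i] else acc) []
  let string := PySem.Str.join " --paragraph* " rsplit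
  PySem.Str.join " " (["--start*"] ++ PySem.Str.split₀ string ++ ["--end*"])

-- ===== PORT B =====
def sanitize_alt (string : String) : String :=
  let lines := (PySem.Str.splitlines string).filter (fun l => l ≠ "")
  let tokens := (PySem.List.enumerate lines).foldl
    (fun toks p =>
      (if p.1 > 0 then toks ++ ["--paragraph*"] else toks) ++ PySem.Str.split₀ p.2)
    ["--start*"]
  PySem.Str.join " " (tokens ++ ["--end*"])

-- ===== PRECONDITION & SPEC =====
def Spec_sanitize (string : String) (out : String) : Prop := out = sanitize_alt string
instance (string : String) (out : String) : Decidable (Spec_sanitize string out) := by unfold Spec_sanitize; infer_instance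

-- ===== CLAIM (what is proved, stated in full; the proofs are below) =====
def Claim_equal_sanitize : Prop := ∀ (string : String), Dom_sanitize string → Spec_sanitize string (sanitize string)

-- ===== LEMMAS AND PROOFS =====

-- flushing the accumulator: go s cur acc = acc.reverse ++ go s cur []
theorem split0_go_acc (s : List Char) : ∀ (cur : List Char) (acc : List (List Char)),
    PySem.Chars.split₀.go s cur acc = acc.reverse ++ PySem.Chars.split₀.go s cur [] := by
  induction s with
  | nil =>
    intro cur acc
    simp only [PySem.Chars.split₀.go]
    by_cases h : cur.isEmpty <;> simp [h]
  | cons c s ih =>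
    intro cur acc
    simp only [PySem.Chars.split₀.go]
    by_cases hw : PySem.Chars.isspace c
    · by_cases hc : cur.isEmpty
      · simp only [hw, hc, if_true]
        exact ih [] acc
      · simp only [hw, hc, if_true, if_false, Bool.false_eq_true]
        rw [ih [] (cur.reverse :: acc), ih [] [cur.reverse]]
        simp
    · simp only [hw, Bool.false_eq_true, if_false]
      exact ih (c :: cur) acc

-- a space cuts the whitespace-split cleanly in two
theorem split0_go_space (ys : List Char) (xs : List Char) :
    ∀ (cur : List Char) (acc : List (List Char)),
    PySem.Chars.split₀.go (xs ++ ' ' :: ys) cur acc =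
      PySem.Chars.split₀.go xs cur acc ++ PySem.Chars.split₀ ys := by
  induction xs with
  | nil =>
    intro cur acc
    simp only [List.nil_append, PySem.Chars.split₀.go, PySem.Chars.split₀]
    have hw : PySem.Chars.isspace ' ' = true := by decide
    by_cases hc : cur.isEmpty
    · simp only [hw, hc, if_true]
      rw [split0_go_acc ys [] acc]
    · simp only [hw, hc, if_true, if_false, Bool.false_eq_true]
      rw [split0_go_acc ys [] (cur.reverse :: acc)]

  | cons c xs ih =>
    intro cur acc
    simp only [List.cons_append, PySem.Chars.split₀.go]
    by_cases hw : PySem.Chars.isspace c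
    · by_cases hc : cur.isEmpty <;> simp only [hw, hc, if_true, if_false, Bool.false_eq_true] <;> exact ih _ _
    · simp only [hw, Bool.false_eq_true, if_false]
      exact ih _ _

theorem split0_append_space (xs ys : List Char) :
    PySem.Chars.split₀ (xs ++ ' ' :: ys) =
      PySem.Chars.split₀ xs ++ PySem.Chars.split₀ ys := by
  simp only [PySem.Chars.split₀]
  exact split0_go_space ys xs [] []

-- the token sequence contributed by the kept lines (char level)
def ctokens : List (List Char) → List (List Char)
  | [] => []
  | l :: ls => PySem.Chars.split₀ l ++ ls.flatMap (fun m => "--paragraph*".toList :: PySem.Chars.split₀ m)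

theorem split0_join (cls : List (List Char)) :
    PySem.Chars.split₀ (PySem.Chars.join (" --paragraph* ".toList) cls) = ctokens cls := by
  induction cls with
  | nil => decide
  | cons l ls ih =>
    cases ls with
    | nil => simp [PySem.Chars.join, List.intercalate, ctokens]
    | cons m ms =>
      have hj : PySem.Chars.join (" --paragraph* ".toList) (l :: m :: ms)
          = l ++ ' ' :: ("--paragraph*".toList ++ ' ' :: PySem.Chars.join (" --paragraph* ".toList) (m :: ms)) := by
        simp [PySem.Chars.join, List.intercalate, List.intersperse]
      rw [hj, split0_append_space, split0_append_space]
      have hpw : PySem.Chars.split₀ ("--paragraph*".toList) = ["--paragraph*".toList] := by decide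
      rw [hpw, ih]
      simp [ctokens]

-- string-level token sequence
def stokens : List String → List String
  | [] => []
  | l :: ls => PySem.Str.split₀ l ++ ls.flatMap (fun m => "--paragraph*" :: PySem.Str.split₀ m)

theorem map_ofList_flat (ms : List String) :
    List.map String.ofList
      ((ms.map String.toList).flatMap (fun m => "--paragraph*".toList :: PySem.Chars.split₀ m))
      = ms.flatMap (fun m => "--paragraph*" :: PySem.Str.split₀ m) := by
  induction ms with
  | nil => simp
  | cons m ms ih =>
    simp only [List.map_cons, List.flatMap_cons, List.map_append]
    simpa [PySem.Str.split₀] using ih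

theorem str_split_join (ls : List String) :
    PySem.Str.split₀ (PySem.Str.join " --paragraph* " ls) = stokens ls := by
  simp only [PySem.Str.split₀, PySem.Str.join, String.toList_ofList]
  rw [split0_join]
  cases ls with
  | nil => simp [ctokens, stokens]
  | cons l ls =>
    simp only [List.map_cons, ctokens, stokens, List.map_append]
    rw [map_ofList_flat]
    rfl

-- A's filter-by-append loop is List.filter
theorem foldl_filter (ls : List String) : ∀ (acc : List String),
    ls.foldl (fun acc i => if i ≠ "" then acc ++ [i] else acc) acc
      = acc ++ ls.filter (fun l => l ≠ "") := by
  induction ls with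
  | nil => simp
  | cons l ls ih =>
    intro acc
    rw [List.foldl_cons, List.filter_cons]
    by_cases h : l = ""
    · rw [if_neg (by simp [h]), if_neg (by simp [h]), ih]
    · rw [if_pos (by simp [h]), if_pos (by simp [h]), ih]
      simp

-- B's enumerate loop, from a positive start index, puts a separator before every line
theorem enum_fold_pos (ls : List String) : ∀ (n : Int) (t : List String), 0 < n →
    (PySem.List.enumerate ls n).foldl
      (fun toks p => (if p.1 > 0 then toks ++ ["--paragraph*"] else toks) ++ PySem.Str.split₀ p.2) t
      = t ++ ls.flatMap (fun m => "--paragraph*" :: PySem.Str.split₀ m) := by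
  induction ls with
  | nil => intro n t _; simp [PySem.List.enumerate]
  | cons l ls ih =>
    intro n t hn
    simp only [PySem.List.enumerate, List.foldl_cons]
    rw [if_pos (by exact hn), ih (n + 1) _ (by omega)]
    simp

theorem enum_fold (ls : List String) :
    (PySem.List.enumerate ls).foldl
      (fun toks p => (if p.1 > 0 then toks ++ ["--paragraph*"] else toks) ++ PySem.Str.split₀ p.2) ["--start*"]
      = "--start*" :: stokens ls := by
  cases ls with
  | nil => decide
  | cons l ls =>
    simp only [PySem.List.enumerate, List.foldl_cons]
    rw [if_neg (by decide), enum_fold_pos ls (0 + 1) _ (by norm_num)]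
    simp [stokens]

-- ===== VERDICT (by name: the statement is the Claim_ definition above) =====
theorem sanitize_spec : Claim_equal_sanitize := by
  intro string _
  show sanitize string = sanitize_alt string
  simp only [sanitize, sanitize_alt]
  rw [foldl_filter, enum_fold, List.nil_append, str_split_join]
  simp
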